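-- pv_equiv track=rewrite | github.com/sbrookshire-raine/academic_hub | planner_helpers.py | group_or_chains
-- ===== SOURCE A (Python) =====
-- def group_or_chains(courses: list[dict]) -> list[list[dict]]:
--     groups = []
--     current_chain = []
--     for course in courses:
--         current_chain.append(course)
--         if not course.get("or_next", False):
--             groups.append(current_chain)
--             current_chain = []
--     if current_chain:
--         groups.append(current_chain)
--     return groups
-- ===== SOURCE B (Python) =====
-- def group_or_chains(courses: list[dict]) -> list[list[dict]]:
--     groups = []
--     for course in reversed(courses):
--         if course.get("or_next", False) and groups:
--             groups[0].insert(0, course)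
--         else:
--             groups.insert(0, [course])
--     return groups
-- ===== Notes on version B (the rewrite author's own statement) =====
-- stated objective: alternative
-- what changed: Builds the result back-to-front: iterates over the courses in reverse and, for each course, either prepends it to the first (i.e. following) group when its or_next flag is truthy, or opens a new group at the front; no current_chain buffer and no post-loop flush exist.
import Mathlib
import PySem

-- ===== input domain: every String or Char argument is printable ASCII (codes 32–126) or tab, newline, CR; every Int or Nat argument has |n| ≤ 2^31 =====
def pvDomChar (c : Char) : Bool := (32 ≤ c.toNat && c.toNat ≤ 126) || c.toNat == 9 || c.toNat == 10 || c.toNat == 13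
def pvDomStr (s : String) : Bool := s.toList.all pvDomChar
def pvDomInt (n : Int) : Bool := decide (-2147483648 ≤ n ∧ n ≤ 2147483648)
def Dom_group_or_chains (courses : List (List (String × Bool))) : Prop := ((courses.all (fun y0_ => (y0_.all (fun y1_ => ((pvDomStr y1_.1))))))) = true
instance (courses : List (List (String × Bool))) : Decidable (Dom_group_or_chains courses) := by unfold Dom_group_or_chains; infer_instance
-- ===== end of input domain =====

-- B builds the result back-to-front over reversed(courses), prepending to the first group
-- instead of A's current_chain buffer + post-loop flush (objective: alternative, same result).

-- ===== PORT A =====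
-- course.get("or_next", False): first-match lookup in the course's association list
def grpFlag (course : List (String × Bool)) : Bool :=
  PySem.Dict.getD ⟨course⟩ "or_next" false

-- step of A's loop: append course to current_chain; flush the chain when or_next is falsy
def grpStepA (st : List (List (List (String × Bool))) × List (List (String × Bool)))
    (course : List (String × Bool)) :
    List (List (List (String × Bool))) × List (List (String × Bool)) :=
  let chain := st.2 ++ [course]
  if grpFlag course then (st.1, chain)
  else (st.1 ++ [chain], [])

def group_or_chains (courses : List (List (String × Bool))) : List (List (List (String × Bool))) :=
  let st := courses.foldl grpStepA ([], [])
  if st.2.isEmpty then st.1 else st.1 ++ [st.2]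

-- ===== PORT B =====
-- B's loop body: prepend to the first group when the flag is truthy and groups is nonempty,
-- otherwise insert a fresh singleton group at the front
def grpStepR (groups : List (List (List (String × Bool)))) (course : List (String × Bool)) :
    List (List (List (String × Bool))) :=
  if grpFlag course && !groups.isEmpty then
    match groups with
    | [] => [[course]]          -- unreachable: groups is nonempty in this branch
    | g :: gs => (course :: g) :: gs
  else
    [course] :: groups

-- Source B iterates 'for course in reversed(courses)' with accumulator groups
def group_or_chains_alt (courses : List (List (String × Bool))) : List (List (List (String × Bool))) :=
  courses.reverse.foldl grpStepR []

-- ===== PRECONDITION & SPEC =====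
def Spec_group_or_chains (courses : List (List (String × Bool))) (out : List (List (List (String × Bool)))) : Prop := out = group_or_chains_alt courses
instance (courses : List (List (String × Bool))) (out : List (List (List (String × Bool)))) : Decidable (Spec_group_or_chains courses out) := by unfold Spec_group_or_chains; infer_instance

-- ===== CLAIM (what is proved, stated in full; the proofs are below) =====
def Claim_equal_group_or_chains : Prop := ∀ (courses : List (List (String × Bool))), Dom_group_or_chains courses → Spec_group_or_chains courses (group_or_chains courses)

-- ===== LEMMAS AND PROOFS =====

-- functional reading of A's loop: group the list starting from a pending chain
def grpAltFrom (chain : List (List (String × Bool))) :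
    List (List (String × Bool)) → List (List (List (String × Bool)))
  | [] => if chain.isEmpty then [] else [chain]
  | c :: cs => if grpFlag c then grpAltFrom (chain ++ [c]) cs else (chain ++ [c]) :: grpAltFrom [] cs

-- prepend into the head group (the semantic core of B's step)
def grpConsHead (x : List (String × Bool)) :
    List (List (List (String × Bool))) → List (List (List (String × Bool)))
  | [] => [[x]]
  | g :: gs => (x :: g) :: gs

theorem grpStepR_eq (gs : List (List (List (String × Bool)))) (c : List (String × Bool)) :
    grpStepR gs c = if grpFlag c then grpConsHead c gs else [c] :: gs := by
  cases gs <;> cases h : grpFlag c <;> simp [grpStepR, grpConsHead, h]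

theorem grpAltFrom_cons (cs : List (List (String × Bool))) :
    ∀ (x : List (String × Bool)) (chain : List (List (String × Bool))),
      grpAltFrom (x :: chain) cs = grpConsHead x (grpAltFrom chain cs) := by
  induction cs with
  | nil =>
    intro x chain
    cases chain <;> simp [grpAltFrom, grpConsHead]
  | cons c cs ih =>
    intro x chain
    cases h : grpFlag c
    · simp [grpAltFrom, h, grpConsHead]
    · have : (x :: chain) ++ [c] = x :: (chain ++ [c]) := by simp
      simp only [grpAltFrom, h, if_true, this]
      exact ih x (chain ++ [c])

theorem grpAltFrom_foldr (cs : List (List (String × Bool))) :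
    grpAltFrom [] cs = cs.foldr (fun c gs => grpStepR gs c) [] := by
  induction cs with
  | nil => rfl
  | cons c cs ih =>
    rw [List.foldr_cons, grpStepR_eq]
    cases h : grpFlag c
    · simp [grpAltFrom, h, ih]
    · have h1 : grpAltFrom [] (c :: cs) = grpAltFrom ([] ++ [c]) cs := by
        simp [grpAltFrom, h]
      rw [h1]
      show grpAltFrom (c :: []) cs = _
      rw [grpAltFrom_cons, ih]
      simp

theorem grpFoldA (cs : List (List (String × Bool))) :
    ∀ (gA : List (List (List (String × Bool)))) (chain : List (List (String × Bool))),
      (cs.foldl grpStepA (gA, chain)).1 ++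
        (if (cs.foldl grpStepA (gA, chain)).2.isEmpty then []
         else [(cs.foldl grpStepA (gA, chain)).2]) = gA ++ grpAltFrom chain cs := by
  induction cs with
  | nil =>
    intro gA chain
    cases chain <;> simp [grpAltFrom]
  | cons c cs ih =>
    intro gA chain
    rw [List.foldl_cons]
    cases h : grpFlag c
    · have hs : grpStepA (gA, chain) c = (gA ++ [chain ++ [c]], []) := by
        simp [grpStepA, h]
      rw [hs, ih]
      simp [grpAltFrom, h]
    · have hs : grpStepA (gA, chain) c = (gA, chain ++ [c]) := by
        simp [grpStepA, h]
      rw [hs, ih]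
      simp [grpAltFrom, h]

-- ===== VERDICT (by name: the statement is the Claim_ definition above) =====
theorem group_or_chains_spec : Claim_equal_group_or_chains := by
  intro courses _
  unfold Spec_group_or_chains group_or_chains group_or_chains_alt
  rw [List.foldl_reverse, ← grpAltFrom_foldr]
  have h := grpFoldA courses [] []
  simp only [List.nil_append] at h
  rw [← h]
  cases hc : (courses.foldl grpStepA ([], [])).2.isEmpty <;> simp [hc]
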